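-- pv_equiv track=rewrite | github.com/datadope-io/ansible_collection_discovery | plugins/action_utils/snmp_utils/utils.py | _get_info_by_template
-- ===== SOURCE A (Python) =====
-- def _get_info_by_template(template, brands, stripped_oid):
--     for brand, snmp_types in brands.items():
--         for snmp_type, oids in snmp_types.items():
--             if stripped_oid in oids.keys():
--                 return _get_info_by_stripped_oid(template, brand, oids, stripped_oid, snmp_type)
--         for snmp_type, oids in snmp_types.items():
--             if stripped_oid.split('.')[0] in oids.keys():
--                 return _get_info_by_stripped_oid(template, brand, oids, stripped_oid.split('.')[0], snmp_type)
--
--     return {}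
--
-- def _get_info_by_stripped_oid(template, brand, oids, stripped_oid, snmp_type):
--     return {k: v for k, v in {
--         'template': template,
--         'brand': brand,
--         'model': oids.get(stripped_oid),
--         'snmp_type': snmp_type
--     }.items() if v is not None}
-- ===== SOURCE B (Python) =====
-- def _get_info_by_template(template, brands, stripped_oid):
--     prefix = stripped_oid.split('.')[0]
--     for brand, snmp_types in brands.items():
--         fallback = None
--         for snmp_type, oids in snmp_types.items():
--             if stripped_oid in oids:
--                 return _info(template, brand, oids, stripped_oid, snmp_type)
--             if fallback is None and prefix in oids:
--                 fallback = (snmp_type, oids)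
--         if fallback is not None:
--             snmp_type, oids = fallback
--             return _info(template, brand, oids, prefix, snmp_type)
--     return {}
--
--
-- def _info(template, brand, oids, key, snmp_type):
--     entries = [('template', template), ('brand', brand),
--                ('model', oids.get(key)), ('snmp_type', snmp_type)]
--     return {k: v for k, v in entries if v is not None}
-- ===== Notes on version B (the rewrite author's own statement) =====
-- stated objective: simpler
-- what changed: B makes a single pass over each brand's snmp_types (returning on an exact key match and remembering the first prefix match as a fallback) instead of A's two full passes per brand, and computes stripped_oid.split('.')[0] once instead of inside every iteration of the second pass.
import Mathlib
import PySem

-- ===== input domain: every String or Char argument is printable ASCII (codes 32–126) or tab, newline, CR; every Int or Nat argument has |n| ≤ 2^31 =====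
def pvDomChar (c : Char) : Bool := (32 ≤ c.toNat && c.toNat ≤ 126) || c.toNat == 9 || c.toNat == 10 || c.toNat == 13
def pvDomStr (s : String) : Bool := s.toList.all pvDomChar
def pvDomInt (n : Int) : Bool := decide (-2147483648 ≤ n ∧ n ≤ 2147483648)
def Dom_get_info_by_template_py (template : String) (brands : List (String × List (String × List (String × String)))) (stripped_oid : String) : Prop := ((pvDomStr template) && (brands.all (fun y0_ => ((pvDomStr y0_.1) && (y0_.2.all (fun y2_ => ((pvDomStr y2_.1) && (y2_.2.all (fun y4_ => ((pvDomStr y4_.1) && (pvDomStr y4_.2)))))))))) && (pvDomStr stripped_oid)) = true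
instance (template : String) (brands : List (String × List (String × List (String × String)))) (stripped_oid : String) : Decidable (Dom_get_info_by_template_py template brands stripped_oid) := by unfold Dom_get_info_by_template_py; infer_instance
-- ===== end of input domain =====

-- B replaces A's two passes per brand (exact-key pass, then pfx-key pass) with one
-- pass that returns on an exact match and remembers the first pfx match as a fallback
-- (objective: simpler).


-- ===== PORT A =====
-- dict membership test 'k in oids.keys()' (assoc list, first match)
def pvHasKey (oids : List (String × String)) (k : String) : Bool :=
  oids.any (fun p => p.1 == k)

-- 'oids.get(k)' (first match, None if absent)
def pvGetKey (oids : List (String × String)) (k : String) : Option String :=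
  (oids.find? (fun p => p.1 == k)).map (·.2)

-- _get_info_by_stripped_oid: dict literal with possibly-None values, filtered
def pvInfoA (template brand : String) (oids : List (String × String)) (k snmp_type : String) : List (String × String) :=
  ([("template", some template), ("brand", some brand),
    ("model", pvGetKey oids k), ("snmp_type", some snmp_type)]
   : List (String × Option String)).filterMap (fun p => p.2.map (fun v => (p.1, v)))

-- first for-loop over snmp_types: exact key match
def pvLoopExact (template brand stripped_oid : String) :
    List (String × List (String × String)) → Option (List (String × String))
  | [] => none
  | (snmp_type, oids) :: rest =>
    if pvHasKey oids stripped_oid then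
      some (pvInfoA template brand oids stripped_oid snmp_type)
    else pvLoopExact template brand stripped_oid rest

-- second for-loop: pfx (stripped_oid.split('.')[0]) key match
def pvLoopPrefix (template brand stripped_oid : String) :
    List (String × List (String × String)) → Option (List (String × String))
  | [] => none
  | (snmp_type, oids) :: rest =>
    if pvHasKey oids (((PySem.Str.split? stripped_oid ".").getD []).head?.getD "") then
      some (pvInfoA template brand oids (((PySem.Str.split? stripped_oid ".").getD []).head?.getD "") snmp_type)
    else pvLoopPrefix template brand stripped_oid rest

def get_info_by_template_py (template : String) (brands : List (String × List (String × List (String × String)))) (stripped_oid : String) : List (String × String) :=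
  match brands with
  | [] => []
  | (brand, snmp_types) :: rest =>
    match pvLoopExact template brand stripped_oid snmp_types with
    | some r => r
    | none =>
      match pvLoopPrefix template brand stripped_oid snmp_types with
      | some r => r
      | none => get_info_by_template_py template rest stripped_oid

-- ===== PORT B =====
def pvInfoB (template brand : String) (oids : List (String × String)) (k snmp_type : String) : List (String × String) :=
  ([("template", some template), ("brand", some brand),
    ("model", (oids.find? (fun p => p.1 == k)).map (·.2)), ("snmp_type", some snmp_type)]
   : List (String × Option String)).filterMap (fun p => p.2.map (fun v => (p.1, v)))

-- B's single pass over one brand's snmp_types, carrying the first pfx fallback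
def pvLoopOne (template brand stripped_oid pfx : String) :
    List (String × List (String × String)) → Option (String × List (String × String)) →
    Option (List (String × String))
  | [], fallback =>
    fallback.map (fun fb => pvInfoB template brand fb.2 pfx fb.1)
  | (snmp_type, oids) :: rest, fallback =>
    if oids.any (fun p => p.1 == stripped_oid) then
      some (pvInfoB template brand oids stripped_oid snmp_type)
    else
      pvLoopOne template brand stripped_oid pfx rest
        (if fallback.isNone && oids.any (fun p => p.1 == pfx) then some (snmp_type, oids)
         else fallback)

def get_info_by_template_py_alt (template : String) (brands : List (String × List (String × List (String × String)))) (stripped_oid : String) : List (String × String) :=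
  let pfx := ((PySem.Str.split? stripped_oid ".").getD []).head?.getD ""
  match brands with
  | [] => []
  | (brand, snmp_types) :: rest =>
    match pvLoopOne template brand stripped_oid pfx snmp_types none with
    | some r => r
    | none => get_info_by_template_py_alt template rest stripped_oid

-- ===== PRECONDITION & SPEC =====
def Spec_get_info_by_template_py (template : String) (brands : List (String × List (String × List (String × String)))) (stripped_oid : String) (out : List (String × String)) : Prop := out = get_info_by_template_py_alt template brands stripped_oid
instance (template : String) (brands : List (String × List (String × List (String × String)))) (stripped_oid : String) (out : List (String × String)) : Decidable (Spec_get_info_by_template_py template brands stripped_oid out) := by unfold Spec_get_info_by_template_py; infer_instance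

-- ===== CLAIM (what is proved, stated in full; the proofs are below) =====
def Claim_equal_get_info_by_template_py : Prop := ∀ (template : String) (brands : List (String × List (String × List (String × String)))) (stripped_oid : String), Dom_get_info_by_template_py template brands stripped_oid → Spec_get_info_by_template_py template brands stripped_oid (get_info_by_template_py template brands stripped_oid)

-- ===== LEMMAS AND PROOFS =====
theorem pvInfoB_eq (template brand : String) (oids : List (String × String)) (k snmp_type : String) :
    pvInfoB template brand oids k snmp_type = pvInfoA template brand oids k snmp_type := by
  simp [pvInfoA, pvInfoB, pvGetKey]

-- One-brand invariant: B's single pass with fallback fb equals A's exact pass,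
-- falling back to fb (if set) and otherwise to A's pfx pass.
theorem pvLoopOne_eq (template brand stripped_oid : String)
    (sts : List (String × List (String × String)))
    (fb : Option (String × List (String × String))) :
    pvLoopOne template brand stripped_oid (((PySem.Str.split? stripped_oid ".").getD []).head?.getD "") sts fb =
      match pvLoopExact template brand stripped_oid sts with
      | some r => some r
      | none =>
        match fb with
        | some p => some (pvInfoB template brand p.2 (((PySem.Str.split? stripped_oid ".").getD []).head?.getD "") p.1)
        | none => pvLoopPrefix template brand stripped_oid sts := by
  induction sts generalizing fb with
  | nil =>
    cases fb <;> simp [pvLoopOne, pvLoopExact, pvLoopPrefix, Option.map]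
  | cons hd tl ih =>
    obtain ⟨snmp_type, oids⟩ := hd
    by_cases hex : oids.any (fun p => p.1 == stripped_oid)
    · simp [pvLoopOne, pvLoopExact, pvHasKey, hex, pvInfoB_eq]
    · rw [pvLoopOne, if_neg hex]
      rw [ih]
      cases fb with
      | some p => simp [pvLoopExact, pvHasKey, hex]
      | none =>
        by_cases hpre : oids.any (fun p => p.1 == (((PySem.Str.split? stripped_oid ".").getD []).head?.getD ""))
        · simp [pvLoopExact, pvLoopPrefix, pvHasKey, hex, hpre, pvInfoB_eq]
        · simp [pvLoopExact, pvLoopPrefix, pvHasKey, hex, hpre]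

theorem pv_main (template stripped_oid : String)
    (brands : List (String × List (String × List (String × String)))) :
    get_info_by_template_py template brands stripped_oid =
      get_info_by_template_py_alt template brands stripped_oid := by
  induction brands with
  | nil => simp [get_info_by_template_py, get_info_by_template_py_alt]
  | cons hd rest ih =>
    obtain ⟨brand, sts⟩ := hd
    rw [get_info_by_template_py, get_info_by_template_py_alt]
    simp only [pvLoopOne_eq]
    cases hx : pvLoopExact template brand stripped_oid sts with
    | some r => simp
    | none =>
      cases hp : pvLoopPrefix template brand stripped_oid sts with
      | some r => simp
      | none => simpa using ih

-- ===== VERDICT (by name: the statement is the Claim_ definition above) =====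
theorem get_info_by_template_py_spec : Claim_equal_get_info_by_template_py := by
  intro template brands stripped_oid _
  unfold Spec_get_info_by_template_py
  exact pv_main template stripped_oid brands
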